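-- pv_equiv track=rewrite | github.com/voyadei/Estructuras-de-datos | LAB01/Lab1.py | mystery_algorithm_3
-- ===== SOURCE A (Python) =====
-- def mystery_algorithm_3(n):
--     """Mystery algorithm 3"""
--     count = 0
--     for _ in range(n):
--         j = 1
--         while j < n:
--             count += 1
--             j *= 2
--     return count
-- ===== SOURCE B (Python) =====
-- def mystery_algorithm_3(n):
--     """Mystery algorithm 3 — closed form: n * (number of powers of 2 below n)."""
--     if n <= 0:
--         return 0
--     return n * (n - 1).bit_length()
-- ===== Notes on version B (the rewrite author's own statement) =====
-- stated objective: faster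
-- what changed: Replaced the n-iteration loop around a doubling inner loop by the closed form n * bit_length(n-1), the exact count of powers of two below n.
import Mathlib
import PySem

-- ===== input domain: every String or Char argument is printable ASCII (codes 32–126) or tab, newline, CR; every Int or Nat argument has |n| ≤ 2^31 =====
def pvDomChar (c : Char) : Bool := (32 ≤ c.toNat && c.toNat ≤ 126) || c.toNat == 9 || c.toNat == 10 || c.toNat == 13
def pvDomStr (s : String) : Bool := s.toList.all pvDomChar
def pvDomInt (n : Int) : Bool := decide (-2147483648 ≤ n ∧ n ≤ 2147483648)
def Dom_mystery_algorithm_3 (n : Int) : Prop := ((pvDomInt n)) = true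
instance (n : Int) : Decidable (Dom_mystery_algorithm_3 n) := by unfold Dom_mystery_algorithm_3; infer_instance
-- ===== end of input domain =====

-- B replaces A's n-iteration loop around a doubling inner loop by the closed form
-- n * bit_length(n-1) (objective: faster, asymptotic).

-- ===== PORT A =====
-- inner 'while j < n: count += 1; j *= 2'; the guard 1 ≤ j only ensures termination:
-- Python only ever runs this with j = 1, from which j stays ≥ 1.
def pvWhileA (n j : Int) : Int :=
  if h : 1 ≤ j ∧ j < n then 1 + pvWhileA n (2 * j) else 0
termination_by (n - j).toNat
decreasing_by omega

def mystery_algorithm_3 (n : Int) : Int :=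
  (PySem.List.pyRange 0 n 1).foldl (fun count _ => count + pvWhileA n 1) 0

-- ===== PORT B =====
-- (m).bit_length of Source B, ported by hand: exact for all naturals
def pvBitLen (m : Nat) : Nat :=
  if m = 0 then 0 else 1 + pvBitLen (m / 2)

def mystery_algorithm_3_alt (n : Int) : Int :=
  if n ≤ 0 then 0 else n * (pvBitLen (n - 1).toNat : Int)

-- ===== PRECONDITION & SPEC =====
def Spec_mystery_algorithm_3 (n : Int) (out : Int) : Prop := out = mystery_algorithm_3_alt n
instance (n : Int) (out : Int) : Decidable (Spec_mystery_algorithm_3 n out) := by unfold Spec_mystery_algorithm_3; infer_instance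

-- ===== CLAIM (what is proved, stated in full; the proofs are below) =====
def Claim_equal_mystery_algorithm_3 : Prop := ∀ (n : Int), Dom_mystery_algorithm_3 n → Spec_mystery_algorithm_3 n (mystery_algorithm_3 n)

-- ===== LEMMAS AND PROOFS =====

-- the inner while loop counts the doublings: pvWhileA n j = bitLen ((n-1)/j) for j ≥ 1
theorem pvWhileA_eq (n j : Int) (hj : 1 ≤ j) :
    pvWhileA n j = (pvBitLen ((n - 1).toNat / j.toNat) : Int) := by
  induction hm : (n - j).toNat using Nat.strong_induction_on generalizing j with
  | _ m ih =>
  by_cases h : 1 ≤ j ∧ j < n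
  · 
    rw [pvWhileA, dif_pos h, ih (n - 2*j).toNat (by omega) (2*j) (by omega) rfl]
    have h1 : (n - 1).toNat / j.toNat ≠ 0 := by
      have hle : j.toNat ≤ (n - 1).toNat := by omega
      have hjpos : 0 < j.toNat := by omega
      have := Nat.one_le_div_iff hjpos |>.mpr hle
      omega
    have hdd : (n - 1).toNat / (2 * j).toNat = (n - 1).toNat / j.toNat / 2 := by
      have h2 : (2 * j).toNat = j.toNat * 2 := by omega
      rw [h2, Nat.div_div_eq_div_mul]
    rw [hdd]
    conv_rhs => rw [pvBitLen]
    rw [if_neg h1]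
    push_cast
    ring
  · rw [pvWhileA, dif_neg h]
    by_cases hn : j < n
    · omega
    · have : (n - 1).toNat / j.toNat = 0 := by
        apply Nat.div_eq_of_lt; omega
      rw [this, pvBitLen]
      simp

theorem foldl_const_add (l : List Int) (k acc : Int) :
    l.foldl (fun c _ => c + k) acc = acc + l.length * k := by
  induction l generalizing acc with
  | nil => simp
  | cons x xs ih => simp [List.foldl, ih]; ring

-- ===== VERDICT (by name: the statement is the Claim_ definition above) =====
theorem mystery_algorithm_3_spec : Claim_equal_mystery_algorithm_3 := by
  intro n _
  show _ = _
  unfold mystery_algorithm_3 mystery_algorithm_3_alt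
  rw [foldl_const_add, pvWhileA_eq n 1 le_rfl]
  have hlen : ((PySem.List.pyRange 0 n 1).length : Int) = if n ≤ 0 then 0 else n := by
    rw [PySem.List.length_pyRange_one]; split_ifs <;> omega
  by_cases hn : n ≤ 0
  · simp [hn]
  · rw [if_neg hn]
    have : (n - 1).toNat / (1 : Int).toNat = (n - 1).toNat := by simp
    rw [this, hlen, if_neg hn]
    ring
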